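-- pv_equiv track=rewrite | github.com/birdsean/tetris-puzzle-eval-generator | generators/shape_synthesizer.py | get_border_points
-- ===== SOURCE A (Python) =====
-- def get_border_points(shape_arr):
--     # get all exterior points around shape
--     border_points = []
--     for i in range(len(shape_arr)):
--         for j in range(len(shape_arr[i])):
--             if shape_arr[i][j] != ' ':
--                 if i == 0 or i == len(shape_arr) - 1 or j == 0 or j == len(shape_arr[i]) - 1:
--                     border_points.append((i, j))
--                 elif shape_arr[i-1][j] == ' ' or shape_arr[i+1][j] == ' ' or shape_arr[i][j-1] == ' ' or shape_arr[i][j+1] == ' ':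
--                     border_points.append((i, j))
--     return border_points
-- ===== SOURCE B (Python) =====
-- def get_border_points(shape_arr):
--     # staged set algebra: interior = occ & its four shifted copies; border = occ (row-major) minus interior
--     occ = [(i, j) for i, row in enumerate(shape_arr) for j, c in enumerate(row) if c != ' ']
--     occ_set = set(occ)
--     interior = occ_set
--     for di, dj in ((-1, 0), (1, 0), (0, -1), (0, 1)):
--         interior = interior & {(i - di, j - dj) for (i, j) in occ_set}
--     return [p for p in occ if p not in interior]
-- ===== Notes on version B (the rewrite author's own statement) =====
-- stated objective: alternative
-- what changed: B works in whole-set stages instead of per-cell neighbour branching: it builds the row-major occupancy list, computes the interior as the intersection of the occupancy set with its four shifted copies, and returns the occupied cells not in the interior, eliminating A's edge-vs-interior branch and neighbour indexing entirely.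
import Mathlib
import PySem

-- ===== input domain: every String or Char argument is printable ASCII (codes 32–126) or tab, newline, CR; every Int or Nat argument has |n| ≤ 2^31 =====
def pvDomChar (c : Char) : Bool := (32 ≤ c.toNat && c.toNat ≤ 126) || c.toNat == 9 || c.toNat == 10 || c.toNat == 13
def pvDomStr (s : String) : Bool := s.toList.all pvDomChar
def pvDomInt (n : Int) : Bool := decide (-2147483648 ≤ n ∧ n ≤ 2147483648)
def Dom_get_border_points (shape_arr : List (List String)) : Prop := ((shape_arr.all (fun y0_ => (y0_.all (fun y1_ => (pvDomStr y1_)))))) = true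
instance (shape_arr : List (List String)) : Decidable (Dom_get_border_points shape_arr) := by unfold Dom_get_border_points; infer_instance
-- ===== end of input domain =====

-- B replaces A's per-cell edge/neighbour branching by staged set algebra — interior = occupancy
-- set intersected with its four shifted copies, border = row-major occupancy list minus interior
-- (alternative; same cost); return values proved equal on Pre_ (exactly where Python A returns).


-- ===== PORT A =====
-- pyGetD with default " " / [] is exact on Pre_: every index A's Python evaluates is then in
-- range; the out-of-range neighbour accesses (Python: IndexError) occur only outside Pre_.
def get_border_points (shape_arr : List (List String)) : List (Int × Int) :=
  (PySem.List.pyRange 0 (shape_arr.length : Int) 1).foldl (fun acc i =>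
    (PySem.List.pyRange 0 ((PySem.List.pyGetD shape_arr i []).length : Int) 1).foldl (fun acc j =>
      if PySem.List.pyGetD (PySem.List.pyGetD shape_arr i []) j " " ≠ " " then
        if i = 0 ∨ i = (shape_arr.length : Int) - 1 ∨ j = 0 ∨
            j = ((PySem.List.pyGetD shape_arr i []).length : Int) - 1 then
          acc ++ [(i, j)]
        else if PySem.List.pyGetD (PySem.List.pyGetD shape_arr (i-1) []) j " " = " " ∨
                PySem.List.pyGetD (PySem.List.pyGetD shape_arr (i+1) []) j " " = " " ∨
                PySem.List.pyGetD (PySem.List.pyGetD shape_arr i []) (j-1) " " = " " ∨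
                PySem.List.pyGetD (PySem.List.pyGetD shape_arr i []) (j+1) " " = " " then
          acc ++ [(i, j)]
        else acc
      else acc) acc) []

-- ===== PORT B =====
-- occ: the list comprehension — coordinates of all non-blank cells, row-major
def pvOccList (shape_arr : List (List String)) : List (Int × Int) :=
  (PySem.List.enumerate shape_arr).flatMap (fun p =>
    ((PySem.List.enumerate p.2).filter (fun q => q.2 ≠ " ")).map (fun q => (p.1, q.1)))

-- the set comprehension {(i - di, j - dj) for (i, j) in occ_set}
def pvShift (occ : PySem.Set (Int × Int)) (d : Int × Int) : PySem.Set (Int × Int) :=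
  PySem.Set.ofList (occ.map (fun p => (p.1 - d.1, p.2 - d.2)))

-- the for-loop over the four directions: interior = interior & shifted copy
def pvInterior (occ : PySem.Set (Int × Int)) : PySem.Set (Int × Int) :=
  [((-1 : Int), (0 : Int)), (1, 0), (0, -1), (0, 1)].foldl
    (fun s d => PySem.Set.inter s (pvShift occ d)) occ

def get_border_points_alt (shape_arr : List (List String)) : List (Int × Int) :=
  (pvOccList shape_arr).filter (fun p =>
    ! PySem.Set.contains (pvInterior (PySem.Set.ofList (pvOccList shape_arr))) p)

-- ===== PRECONDITION & SPEC =====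
-- Pre_ excludes exactly the inputs where Python A raises IndexError: a jagged grid with an
-- interior non-blank cell whose column is out of range of the row above, or (when the cell
-- above is non-blank, so A's short-circuit reaches the access) of the row below.
def Pre_get_border_points (shape_arr : List (List String)) : Prop :=
  ∀ i < shape_arr.length, ∀ j < (shape_arr.getD i []).length,
    (0 < i ∧ i + 1 < shape_arr.length ∧ 0 < j ∧ j + 1 < (shape_arr.getD i []).length ∧
      (shape_arr.getD i []).getD j " " ≠ " ") →
    j < (shape_arr.getD (i-1) []).length ∧
      ((shape_arr.getD (i-1) []).getD j " " = " " ∨ j < (shape_arr.getD (i+1) []).length)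
instance (shape_arr : List (List String)) : Decidable (Pre_get_border_points shape_arr) := by
  unfold Pre_get_border_points; infer_instance

def pvWitness_get_border_points : List (List String) :=
  [[" ", "x", " "], ["x", "x", "x"], [" ", "x", " "]]

def Spec_get_border_points (shape_arr : List (List String)) (out : List (Int × Int)) : Prop :=
  out = get_border_points_alt shape_arr
instance (shape_arr : List (List String)) (out : List (Int × Int)) :
    Decidable (Spec_get_border_points shape_arr out) := by
  unfold Spec_get_border_points; infer_instance

-- ===== CLAIM (what is proved, stated in full; the proofs are below) =====
def Claim_equal_get_border_points : Prop :=
  ∀ (shape_arr : List (List String)), Dom_get_border_points shape_arr →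
    Pre_get_border_points shape_arr →
    Spec_get_border_points shape_arr (get_border_points shape_arr)

-- ===== LEMMAS AND PROOFS =====

-- A's append condition at cell (i, j), as a single Bool
def pvCondA (s : List (List String)) (i j : Int) : Bool :=
  decide (PySem.List.pyGetD (PySem.List.pyGetD s i []) j " " ≠ " ") &&
    (decide (i = 0 ∨ i = (s.length : Int) - 1 ∨ j = 0 ∨
             j = ((PySem.List.pyGetD s i []).length : Int) - 1) ||
     decide (PySem.List.pyGetD (PySem.List.pyGetD s (i-1) []) j " " = " " ∨
             PySem.List.pyGetD (PySem.List.pyGetD s (i+1) []) j " " = " " ∨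
             PySem.List.pyGetD (PySem.List.pyGetD s i []) (j-1) " " = " " ∨
             PySem.List.pyGetD (PySem.List.pyGetD s i []) (j+1) " " = " "))

-- (i, j) is occupied and some 4-neighbour coordinate is absent from occ
def pvExposed (occ : PySem.Set (Int × Int)) (i j : Int) : Bool :=
  [(i - 1, j), (i + 1, j), (i, j - 1), (i, j + 1)].any
    (fun q => !(PySem.Set.contains occ q))

def pvCondB (s : List (List String)) (i j : Int) : Bool :=
  PySem.Set.contains (PySem.Set.ofList (pvOccList s)) (i, j) &&
    pvExposed (PySem.Set.ofList (pvOccList s)) i j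

-- out-of-range or blank: the getD-with-" " reading of a cell is blank iff the cell is not occupied
lemma pvBlank_iff (xs : List String) (b : Int) :
    PySem.List.pyGetD xs b " " = " " ↔
      ¬ (b < (xs.length : Int) ∧ PySem.List.pyGetD xs b " " ≠ " ") := by
  by_cases h : b < (xs.length : Int)
  · simp [h]
  · have hnone : PySem.List.pyGet? xs b = none := by
      rw [PySem.List.pyGet?_eq_none_iff]
      simp only [PySem.Raise.InRange]
      omega
    rw [PySem.List.pyGetD_of_none _ _ _ hnone]
    simp [h]

lemma pvMem_occ (s : List (List String)) (a b : Int) :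
    (a, b) ∈ pvOccList s ↔
      0 ≤ a ∧ a < (s.length : Int) ∧ 0 ≤ b ∧
      b < ((PySem.List.pyGetD s a []).length : Int) ∧
      PySem.List.pyGetD (PySem.List.pyGetD s a []) b " " ≠ " " := by
  unfold pvOccList
  simp only [List.mem_flatMap, List.mem_map, List.mem_filter,
    PySem.List.mem_enumerate_iff]
  constructor
  · rintro ⟨p, ⟨k, hk, rfl⟩, q, ⟨⟨l, hl, rfl⟩, hq⟩, hab⟩
    simp only [zero_add, Prod.mk.injEq] at hab hq
    obtain ⟨ha, hb2⟩ := hab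
    subst ha hb2
    have hrow : PySem.List.pyGetD s (k : Int) [] = s[k] := by
      rw [PySem.List.pyGetD_eq_getElem s ([] : List String) (by positivity) (by exact_mod_cast hk)]
      simp
    have hcell : PySem.List.pyGetD (PySem.List.pyGetD s (k : Int) []) (l : Int) " " = s[k][l] := by
      rw [hrow, PySem.List.pyGetD_eq_getElem _ (" ") (by positivity) (by exact_mod_cast hl)]
      simp
    refine ⟨by positivity, by exact_mod_cast hk, by positivity, ?_, ?_⟩
    · rw [hrow]; exact_mod_cast hl
    · rw [hcell]; simpa using hq
  · rintro ⟨ha0, han, hb0, hbm, hcell⟩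
    have hk : a.toNat < s.length := by omega
    have hrow : PySem.List.pyGetD s a [] = s[a.toNat] :=
      PySem.List.pyGetD_eq_getElem s ([] : List String) ha0 han
    rw [hrow] at hbm hcell
    have hl : b.toNat < s[a.toNat].length := by omega
    have hcell' : PySem.List.pyGetD s[a.toNat] b " " = s[a.toNat][b.toNat] :=
      PySem.List.pyGetD_eq_getElem _ _ hb0 hbm
    rw [hcell'] at hcell
    exact ⟨((a.toNat : Int), s[a.toNat]), ⟨a.toNat, hk, by simp⟩,
      ((b.toNat : Int), s[a.toNat][b.toNat]), ⟨⟨b.toNat, hl, by simp⟩, by simpa using hcell⟩,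
      by simp [Int.toNat_of_nonneg ha0, Int.toNat_of_nonneg hb0]⟩

-- membership in a shifted copy of occ
lemma pvMem_shift (occ : PySem.Set (Int × Int)) (d p : Int × Int) :
    p ∈ pvShift occ d ↔ (p.1 + d.1, p.2 + d.2) ∈ occ := by
  unfold pvShift
  rw [PySem.Set.mem_ofList, List.mem_map]
  constructor
  · rintro ⟨q, hq, rfl⟩
    simpa using hq
  · intro h
    exact ⟨(p.1 + d.1, p.2 + d.2), h, by simp⟩

-- membership in the staged intersection: occupied with all four neighbours occupied
lemma pvMem_interior (occ : PySem.Set (Int × Int)) (p : Int × Int) :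
    p ∈ pvInterior occ ↔
      p ∈ occ ∧ (p.1 - 1, p.2) ∈ occ ∧ (p.1 + 1, p.2) ∈ occ ∧
        (p.1, p.2 - 1) ∈ occ ∧ (p.1, p.2 + 1) ∈ occ := by
  unfold pvInterior
  simp only [List.foldl_cons, List.foldl_nil, PySem.Set.mem_inter, pvMem_shift,
    add_zero, ← sub_eq_add_neg]
  tauto

-- the filter condition of B, rewritten through the interior set, for occupied cells
lemma pvFilter_cond (s : List (List String)) (p : Int × Int) (hp : p ∈ pvOccList s) :
    (! PySem.Set.contains (pvInterior (PySem.Set.ofList (pvOccList s))) p) =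
      pvExposed (PySem.Set.ofList (pvOccList s)) p.1 p.2 := by
  have hci : PySem.Set.contains (pvInterior (PySem.Set.ofList (pvOccList s))) p =
      (PySem.Set.contains (PySem.Set.ofList (pvOccList s)) p &&
       (PySem.Set.contains (PySem.Set.ofList (pvOccList s)) (p.1 - 1, p.2) &&
        (PySem.Set.contains (PySem.Set.ofList (pvOccList s)) (p.1 + 1, p.2) &&
         (PySem.Set.contains (PySem.Set.ofList (pvOccList s)) (p.1, p.2 - 1) &&
          PySem.Set.contains (PySem.Set.ofList (pvOccList s)) (p.1, p.2 + 1))))) := by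
    rw [Bool.eq_iff_iff]
    simp [pvMem_interior]
  have hoccb : PySem.Set.contains (PySem.Set.ofList (pvOccList s)) p = true := by
    simp [PySem.Set.mem_ofList, hp]
  rw [hci, hoccb]
  simp [pvExposed, Bool.not_and]

lemma pvCond_eq (s : List (List String)) (i j : Int)
    (hi0 : 0 ≤ i) (hin : i < (s.length : Int)) (hj0 : 0 ≤ j)
    (hjm : j < ((PySem.List.pyGetD s i []).length : Int)) :
    pvCondA s i j = pvCondB s i j := by
  rw [Bool.eq_iff_iff]
  unfold pvCondA pvCondB
  simp only [pvExposed, List.any_cons, List.any_nil, Bool.or_false, Bool.and_eq_true,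
    Bool.or_eq_true, decide_eq_true_eq, Bool.not_eq_true', Bool.eq_false_iff, ne_eq,
    PySem.Set.contains_iff, PySem.Set.mem_ofList, pvMem_occ]
  have hmem0 : (0 ≤ i ∧ i < (s.length : Int) ∧ 0 ≤ j ∧
      j < ((PySem.List.pyGetD s i []).length : Int) ∧
      ¬PySem.List.pyGetD (PySem.List.pyGetD s i []) j " " = " ") ↔
      ¬PySem.List.pyGetD (PySem.List.pyGetD s i []) j " " = " " :=
    ⟨fun h => h.2.2.2.2, fun h => ⟨hi0, hin, hj0, hjm, h⟩⟩
  rw [hmem0]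
  by_cases hc : PySem.List.pyGetD (PySem.List.pyGetD s i []) j " " = " "
  · simp [hc]
  · simp only [hc, not_false_eq_true, true_and]
    by_cases hE : i = 0 ∨ i = (s.length : Int) - 1 ∨ j = 0 ∨
        j = ((PySem.List.pyGetD s i []).length : Int) - 1
    · refine iff_of_true (Or.inl hE) ?_
      rcases hE with h | h | h | h
      · exact Or.inl (fun hm => absurd hm.1 (by omega))
      · exact Or.inr (Or.inl (fun hm => absurd hm.2.1 (by omega)))
      · exact Or.inr (Or.inr (Or.inl (fun hm => absurd hm.2.2.1 (by omega))))
      · exact Or.inr (Or.inr (Or.inr (fun hm => absurd hm.2.2.2.1 (by omega))))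
    · push Not at hE
      obtain ⟨hE1, hE2, hE3, hE4⟩ := hE
      have e1 : PySem.List.pyGetD (PySem.List.pyGetD s (i-1) []) j " " = " " ↔
          ¬(0 ≤ i - 1 ∧ i - 1 < (s.length : Int) ∧ 0 ≤ j ∧
            j < ((PySem.List.pyGetD s (i-1) []).length : Int) ∧
            ¬PySem.List.pyGetD (PySem.List.pyGetD s (i-1) []) j " " = " ") := by
        exact (pvBlank_iff _ _).trans
          ⟨fun h hm => h ⟨hm.2.2.2.1, hm.2.2.2.2⟩,
           fun h hp => h ⟨by omega, by omega, hj0, hp.1, hp.2⟩⟩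
      have e2 : PySem.List.pyGetD (PySem.List.pyGetD s (i+1) []) j " " = " " ↔
          ¬(0 ≤ i + 1 ∧ i + 1 < (s.length : Int) ∧ 0 ≤ j ∧
            j < ((PySem.List.pyGetD s (i+1) []).length : Int) ∧
            ¬PySem.List.pyGetD (PySem.List.pyGetD s (i+1) []) j " " = " ") := by
        exact (pvBlank_iff _ _).trans
          ⟨fun h hm => h ⟨hm.2.2.2.1, hm.2.2.2.2⟩,
           fun h hp => h ⟨by omega, by omega, hj0, hp.1, hp.2⟩⟩
      have e3 : PySem.List.pyGetD (PySem.List.pyGetD s i []) (j-1) " " = " " ↔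
          ¬(0 ≤ i ∧ i < (s.length : Int) ∧ 0 ≤ j - 1 ∧
            j - 1 < ((PySem.List.pyGetD s i []).length : Int) ∧
            ¬PySem.List.pyGetD (PySem.List.pyGetD s i []) (j-1) " " = " ") := by
        exact (pvBlank_iff _ _).trans
          ⟨fun h hm => h ⟨hm.2.2.2.1, hm.2.2.2.2⟩,
           fun h hp => h ⟨hi0, hin, by omega, hp.1, hp.2⟩⟩
      have e4 : PySem.List.pyGetD (PySem.List.pyGetD s i []) (j+1) " " = " " ↔
          ¬(0 ≤ i ∧ i < (s.length : Int) ∧ 0 ≤ j + 1 ∧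
            j + 1 < ((PySem.List.pyGetD s i []).length : Int) ∧
            ¬PySem.List.pyGetD (PySem.List.pyGetD s i []) (j+1) " " = " ") := by
        exact (pvBlank_iff _ _).trans
          ⟨fun h hm => h ⟨hm.2.2.2.1, hm.2.2.2.2⟩,
           fun h hp => h ⟨hi0, hin, by omega, hp.1, hp.2⟩⟩
      simp only [hE1, hE2, hE3, hE4, false_or]
      exact or_congr e1 (or_congr e2 (or_congr e3 e4))

lemma pvA_eq (s : List (List String)) :
    get_border_points s =
      (PySem.List.pyRange 0 (s.length : Int) 1).flatMap (fun i =>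
        ((PySem.List.pyRange 0 ((PySem.List.pyGetD s i []).length : Int) 1).filter
          (fun j => pvCondA s i j)).map (fun j => (i, j))) := by
  unfold get_border_points
  have hbody : ∀ (i j : Int) (acc : List (Int × Int)),
      (if PySem.List.pyGetD (PySem.List.pyGetD s i []) j " " ≠ " " then
        if i = 0 ∨ i = (s.length : Int) - 1 ∨ j = 0 ∨
            j = ((PySem.List.pyGetD s i []).length : Int) - 1 then
          acc ++ [(i, j)]
        else if PySem.List.pyGetD (PySem.List.pyGetD s (i-1) []) j " " = " " ∨
                PySem.List.pyGetD (PySem.List.pyGetD s (i+1) []) j " " = " " ∨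
                PySem.List.pyGetD (PySem.List.pyGetD s i []) (j-1) " " = " " ∨
                PySem.List.pyGetD (PySem.List.pyGetD s i []) (j+1) " " = " " then
          acc ++ [(i, j)]
        else acc
      else acc)
      = if pvCondA s i j then acc ++ [(i, j)] else acc := by
    intro i j acc
    by_cases h1 : PySem.List.pyGetD (PySem.List.pyGetD s i []) j " " = " "
    · simp [pvCondA, h1]
    · by_cases h2 : i = 0 ∨ i = (s.length : Int) - 1 ∨ j = 0 ∨
          j = ((PySem.List.pyGetD s i []).length : Int) - 1
      · simp [pvCondA, h1, h2]
      · by_cases h3 : PySem.List.pyGetD (PySem.List.pyGetD s (i-1) []) j " " = " " ∨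
            PySem.List.pyGetD (PySem.List.pyGetD s (i+1) []) j " " = " " ∨
            PySem.List.pyGetD (PySem.List.pyGetD s i []) (j-1) " " = " " ∨
            PySem.List.pyGetD (PySem.List.pyGetD s i []) (j+1) " " = " " <;>
          simp [pvCondA, h1, h2, h3]
  simp only [hbody, PySem.List.foldl_append_if, PySem.List.foldl_append_eq_flatMap,
    List.nil_append]

lemma pvOcc_filter (s : List (List String)) (P : Int × Int → Bool) :
    (pvOccList s).filter P =
      (PySem.List.pyRange 0 (s.length : Int) 1).flatMap (fun i =>
        ((PySem.List.pyRange 0 ((PySem.List.pyGetD s i []).length : Int) 1).filter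
          (fun j => P (i, j) &&
            decide (PySem.List.pyGetD (PySem.List.pyGetD s i []) j " " ≠ " "))).map
          (fun j => (i, j))) := by
  unfold pvOccList
  rw [List.filter_flatMap]
  rw [PySem.List.enumerate_eq_map_pyRange s ([] : List String), List.flatMap_map]
  refine List.flatMap_congr (fun i hi => ?_)
  rw [List.filter_map, List.filter_filter,
    PySem.List.enumerate_eq_map_pyRange _ (" "), List.filter_map, List.map_map]
  simp [Function.comp_def]

lemma pvB_eq (s : List (List String)) :
    get_border_points_alt s =
      (PySem.List.pyRange 0 (s.length : Int) 1).flatMap (fun i =>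
        ((PySem.List.pyRange 0 ((PySem.List.pyGetD s i []).length : Int) 1).filter
          (fun j => pvCondB s i j)).map (fun j => (i, j))) := by
  unfold get_border_points_alt
  rw [List.filter_congr (fun p hp => pvFilter_cond s p hp),
    pvOcc_filter s (fun p => pvExposed (PySem.Set.ofList (pvOccList s)) p.1 p.2)]
  refine List.flatMap_congr (fun i hi => ?_)
  rw [PySem.List.mem_pyRange_one] at hi
  refine congrArg _ (List.filter_congr (fun j hj => ?_))
  rw [PySem.List.mem_pyRange_one] at hj
  unfold pvCondB
  rw [Bool.eq_iff_iff]
  simp only [Bool.and_eq_true, decide_eq_true_eq, ne_eq, PySem.Set.contains_iff,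
    PySem.Set.mem_ofList, pvMem_occ]
  exact ⟨fun h => ⟨⟨hi.1, hi.2, hj.1, hj.2, h.2⟩, h.1⟩, fun h => ⟨h.2, h.1.2.2.2.2⟩⟩

-- ===== VERDICT (by name: the statement is the Claim_ definition above) =====
theorem get_border_points_spec : Claim_equal_get_border_points := by
  intro s _ _
  unfold Spec_get_border_points
  rw [pvA_eq, pvB_eq]
  refine List.flatMap_congr (fun i hi => ?_)
  rw [PySem.List.mem_pyRange_one] at hi
  refine congrArg _ (List.filter_congr (fun j hj => ?_))
  rw [PySem.List.mem_pyRange_one] at hj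
  exact pvCond_eq s i j hi.1 hi.2 hj.1 hj.2
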